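-- pv_equiv track=rewrite | github.com/ccc612/problem_solving | hand_coding/Algospot_PALINDROMIZE.py | checkMinPLength
-- ===== SOURCE A (Python) =====
-- def isP(string, left, right):
--     while left < right:
--         if string[left] != string[right]:
--             return False
--         left, right = left+1, right-1
--     return True
--
-- def checkMinPLength(string):
--     left = 0
--     right = len(string) - 1
--     add = 0
--     result = 0
--
--     while left < right:
--         if isP(string, left, right):
--             break
--         else:
--             right -= 1
--             add += 1
--     result = len(string) + add
--
--     add = 0
--     left = 0
--     right = len(string) - 1
--
--     while left < right:
--         if isP(string, left, right):
--             break
--         else: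
--             left += 1
--             add += 1
--
--     return min(result, len(string) + add)
-- ===== SOURCE B (Python) =====
-- def checkMinPLength(string):
--     # KMP failure-function approach: the longest palindromic prefix of s is the
--     # last value of the prefix function of s + '\x00' + s[::-1] (strings in the
--     # task's domain never contain NUL). Same for the reversed string; answer is
--     # 2*n minus the longer of the two.
--     def lpp(s):
--         t = s + '\x00' + s[::-1]
--         pi = [0] * len(t)
--         for i in range(1, len(t)):
--             k = pi[i - 1]
--             while k > 0 and t[i] != t[k]:
--                 k = pi[k - 1]
--             if t[i] == t[k]:
--                 k += 1
--             pi[i] = k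
--         return pi[-1]
--     n = len(string)
--     return 2 * n - max(lpp(string), lpp(string[::-1]))
-- ===== Notes on version B (the rewrite author's own statement) =====
-- stated objective: alternative
-- what changed: B computes the longest palindromic prefix/suffix via the KMP failure function of s + '\x00' + reversed(s) (single linear table build per pass) instead of A's shrink-one-end-and-recheck two-pointer loops, then returns 2*n - max of the two.
import Mathlib
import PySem

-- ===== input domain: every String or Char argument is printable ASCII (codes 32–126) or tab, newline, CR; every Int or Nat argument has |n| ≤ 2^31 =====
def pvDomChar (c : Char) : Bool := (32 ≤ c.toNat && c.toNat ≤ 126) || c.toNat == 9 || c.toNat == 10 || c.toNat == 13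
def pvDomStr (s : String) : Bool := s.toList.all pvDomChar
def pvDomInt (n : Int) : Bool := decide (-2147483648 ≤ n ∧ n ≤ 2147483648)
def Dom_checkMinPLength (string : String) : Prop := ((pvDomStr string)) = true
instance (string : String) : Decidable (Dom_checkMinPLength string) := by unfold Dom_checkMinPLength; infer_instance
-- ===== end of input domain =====

-- B finds the longest palindromic prefix/suffix via the KMP failure function of
-- s + '\x00' + reversed(s) instead of A's shrink-and-recheck two-pointer loops
-- ('\x00' never occurs in domain strings); alternative algorithm, same return value.

-- ===== PORT A =====
-- helper isP(string, left, right): two-pointer palindrome check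
def isP (cs : List Char) (left right : Int) : Bool :=
  if _h : left < right then
    if PySem.List.pyGet? cs left ≠ PySem.List.pyGet? cs right then false
    else isP cs (left + 1) (right - 1)
  else true
termination_by (right - left).toNat
decreasing_by omega

-- first while loop of A: right decreases, add counts the shrink steps
def loopR (cs : List Char) (left right add : Int) : Int :=
  if _h : left < right then
    if isP cs left right then add else loopR cs left (right - 1) (add + 1)
  else add
termination_by (right - left).toNat
decreasing_by omega

-- second while loop of A: left increases
def loopL (cs : List Char) (left right add : Int) : Int :=
  if _h : left < right then
    if isP cs left right then add else loopL cs (left + 1) right (add + 1)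
  else add
termination_by (right - left).toNat
decreasing_by omega

def checkMinPLength (string : String) : Int :=
  let cs := string.toList
  let n : Int := cs.length
  let result := n + loopR cs 0 (n - 1) 0
  min result (n + loopL cs 0 (n - 1) 0)

-- ===== PORT B =====
-- separator '\x00' used by Source B (never occurs in strings of the input domain)
def sepB : Char := Char.ofNat 0

-- Source B inner while loop: `while k > 0 and t[i] != t[k]: k = pi[k-1]`
-- (the `else 0` branch is a totality guard only; pi entries are below their index + 1, so it is dead)
def kmpFall (pi : Array Nat) (t : List Char) (c : Char) (k : Nat) : Nat :=
  if _h : 0 < k ∧ c ≠ t.getD k sepB then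
    if hk : pi.getD (k - 1) 0 < k then kmpFall pi t c (pi.getD (k - 1) 0) else 0
  else k
termination_by k
decreasing_by simpa [Array.getD_eq_getD_getElem?] using hk

-- body of one iteration of Source B's for loop: the while loop, then `if t[i] == t[k]: k += 1`
def kmpStep (pi : Array Nat) (t : List Char) (c : Char) (k0 : Nat) : Nat :=
  if c = t.getD (kmpFall pi t c k0) sepB then kmpFall pi t c k0 + 1 else kmpFall pi t c k0

-- Source B's `for i in range(1, len(t))`, building the prefix-function table pi
def kmpLoop (t : List Char) (pi : Array Nat) (i : Nat) : Array Nat :=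
  if _h : i < t.length then
    kmpLoop t (pi.push (kmpStep pi t (t.getD i sepB) (pi.getD (i - 1) 0))) (i + 1)
  else pi
termination_by t.length - i

-- Source B's lpp(s): last prefix-function value of t = s + '\x00' + s[::-1]
def lppB (s : List Char) : Nat :=
  (kmpLoop (s ++ sepB :: s.reverse) #[0] 1).getD ((s ++ sepB :: s.reverse).length - 1) 0

def checkMinPLength_alt (string : String) : Int :=
  let cs := string.toList
  let n := cs.length
  2 * (n : Int) - ((max (lppB cs) (lppB cs.reverse) : Nat) : Int)

-- ===== PRECONDITION & SPEC =====
def Spec_checkMinPLength (string : String) (out : Int) : Prop := out = checkMinPLength_alt string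
instance (string : String) (out : Int) : Decidable (Spec_checkMinPLength string out) := by unfold Spec_checkMinPLength; infer_instance

-- ===== CLAIM (what is proved, stated in full; the proofs are below) =====
def Claim_equal_checkMinPLength : Prop := ∀ (string : String), Dom_checkMinPLength string → Spec_checkMinPLength string (checkMinPLength string)

-- ===== LEMMAS AND PROOFS =====

-- longest palindromic prefix within bound k, as a greatest-witness value
def GPal (cs : List Char) (k : Nat) : Nat :=
  Nat.findGreatest (fun j => cs.take j = (cs.take j).reverse) k

-- longest palindromic suffix within bound k
def HPal (cs : List Char) (k : Nat) : Nat :=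
  Nat.findGreatest (fun j => cs.drop (cs.length - j) = (cs.drop (cs.length - j)).reverse) k

-- k is a proper border of u: the length-k prefix equals the length-k suffix
def isBorder (u : List Char) (k : Nat) : Bool :=
  decide (k < u.length ∧ u.take k = u.drop (u.length - k))

-- length of the longest proper border of u
def maxBorder (u : List Char) : Nat :=
  Nat.findGreatest (fun k => isBorder u k = true) (u.length - 1)

lemma isBorder_iff (u : List Char) (k : Nat) :
    isBorder u k = true ↔ (k < u.length ∧ u.take k = u.drop (u.length - k)) := by
  simp [isBorder]

lemma isBorder_zero (u : List Char) (h : u ≠ []) : isBorder u 0 = true := by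
  rw [isBorder_iff]
  exact ⟨List.length_pos_of_ne_nil h, by simp⟩

lemma border_le_max (u : List Char) (k : Nat) (h : isBorder u k = true) : k ≤ maxBorder u := by
  have hk := ((isBorder_iff u k).mp h).1
  exact Nat.le_findGreatest (by omega) h

lemma max_isBorder (u : List Char) (h : u ≠ []) : isBorder u (maxBorder u) = true :=
  Nat.findGreatest_spec (P := fun k => isBorder u k = true) (Nat.zero_le _) (isBorder_zero u h)

lemma maxBorder_lt (u : List Char) (h : u ≠ []) : maxBorder u < u.length := by
  have h1 := Nat.findGreatest_le (P := fun k => isBorder u k = true) (u.length - 1)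
  have h2 := List.length_pos_of_ne_nil h
  rw [maxBorder]
  omega

-- a smaller border is a border of the larger border (chain step, downward)
lemma border_down (u : List Char) (k1 k2 : Nat) (h1 : isBorder u k1 = true)
    (h2 : isBorder u k2 = true) (hlt : k1 < k2) : isBorder (u.take k2) k1 = true := by
  obtain ⟨hl1, he1⟩ := (isBorder_iff _ _).mp h1
  obtain ⟨hl2, he2⟩ := (isBorder_iff _ _).mp h2
  have hlen : (u.take k2).length = k2 := by simp [List.length_take]; omega
  rw [isBorder_iff, hlen]
  refine ⟨hlt, ?_⟩
  rw [List.take_take, min_eq_left (le_of_lt hlt)]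
  conv_rhs => rw [he2]
  rw [List.drop_drop]
  have hidx : u.length - k2 + (k2 - k1) = u.length - k1 := by omega
  rw [hidx, ← he1]

-- a border of a border of u is a border of u (chain step, upward)
lemma border_up (u : List Char) (k1 k2 : Nat) (h2 : isBorder u k2 = true)
    (h1 : isBorder (u.take k2) k1 = true) : isBorder u k1 = true := by
  obtain ⟨hl2, he2⟩ := (isBorder_iff _ _).mp h2
  obtain ⟨hl1, he1⟩ := (isBorder_iff _ _).mp h1
  have hlen : (u.take k2).length = k2 := by simp [List.length_take]; omega
  rw [hlen] at hl1 he1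
  rw [isBorder_iff]
  refine ⟨by omega, ?_⟩
  have lhs : u.take k1 = (u.take k2).take k1 := by
    rw [List.take_take, min_eq_left (by omega)]
  rw [lhs, he1]
  conv_lhs => rw [he2]
  rw [List.drop_drop]
  congr 1
  omega

-- borders of u ++ [c] of positive length are exactly (border of u followed by matching char) + 1
lemma border_ext (u : List Char) (c : Char) (k : Nat) :
    isBorder (u ++ [c]) (k + 1) = true ↔ (isBorder u k = true ∧ u.getD k sepB = c) := by
  rw [isBorder_iff, isBorder_iff]
  have hlen : (u ++ [c]).length = u.length + 1 := by simp
  by_cases hk : k < u.length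
  · have htk : (u ++ [c]).take (k + 1) = u.take k ++ [u[k]] := by
      rw [List.take_append_of_le_length (by omega), List.take_add_one,
        List.getElem?_eq_getElem hk]
      rfl
    have hdr : (u ++ [c]).drop ((u ++ [c]).length - (k + 1)) = u.drop (u.length - k) ++ [c] := by
      rw [hlen]
      have : u.length + 1 - (k + 1) = u.length - k := by omega
      rw [this, List.drop_append_of_le_length (by omega)]
    have hgd : u.getD k sepB = u[k] := List.getD_eq_getElem u sepB hk
    rw [htk, hdr, hlen, List.append_singleton_inj, hgd]
    constructor
    · rintro ⟨_, hpre, hc⟩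
      exact ⟨⟨hk, hpre⟩, hc⟩
    · rintro ⟨⟨_, hpre⟩, hc⟩
      exact ⟨by omega, hpre, hc⟩
  · constructor
    · rintro ⟨hlt, -⟩
      rw [hlen] at hlt
      omega
    · rintro ⟨⟨hlt, -⟩, -⟩
      omega

lemma getD_take (t : List Char) (i k : Nat) (h : k < i) :
    (t.take i).getD k sepB = t.getD k sepB := by
  simp [List.getD_eq_getElem?_getD, h]

lemma getD_push_lt (a : Array Nat) (x : Nat) (j : Nat) (h : j < a.size) :
    (a.push x).getD j 0 = a.getD j 0 := by
  rw [Array.getD, Array.getD, dif_pos (by simp; omega), dif_pos h]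
  exact Array.getElem_push_lt h

lemma getD_push_size (a : Array Nat) (x : Nat) : (a.push x).getD a.size 0 = x := by
  rw [Array.getD, dif_pos (by simp)]
  simp

-- the while loop walks the border chain: it returns the largest border of t.take i
-- that is followed by c (or 0 if there is none)
lemma kmpFall_spec (t : List Char) (pi : Array Nat) (i : Nat) (hi : i ≤ t.length)
    (hpi : ∀ j, j < i → pi.getD j 0 = maxBorder (t.take (j + 1))) (c : Char) :
    ∀ k, isBorder (t.take i) k = true →
      (∀ m, isBorder (t.take i) m = true → t.getD m sepB = c → m ≤ k) →
      (isBorder (t.take i) (kmpFall pi t c k) = true ∧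
       (∀ m, isBorder (t.take i) m = true → t.getD m sepB = c → m ≤ kmpFall pi t c k) ∧
       (kmpFall pi t c k = 0 ∨ t.getD (kmpFall pi t c k) sepB = c)) := by
  intro k
  induction k using Nat.strong_induction_on with
  | _ k ih =>
    intro hkb hmax
    rw [kmpFall.eq_def]
    by_cases hcond : 0 < k ∧ c ≠ t.getD k sepB
    · rw [dif_pos hcond]
      obtain ⟨hkpos, hcne⟩ := hcond
      have hulen : (t.take i).length = i := by simp [List.length_take]; omega
      have hklen : k < i := by
        have := ((isBorder_iff _ _).mp hkb).1
        omega
      have htk : t.take k = (t.take i).take k := by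
        rw [List.take_take, min_eq_left (by omega)]
      have hne : t.take k ≠ [] := by
        have hlk : (t.take k).length = k := by simp [List.length_take]; omega
        intro hnil
        rw [hnil] at hlk
        simp at hlk
        omega
      have hk' : pi.getD (k - 1) 0 = maxBorder (t.take k) := by
        rw [hpi (k - 1) (by omega)]
        congr 2
        omega
      have hk'lt : pi.getD (k - 1) 0 < k := by
        rw [hk']
        have h1 := maxBorder_lt (t.take k) hne
        have h2 : (t.take k).length = k := by simp [List.length_take]; omega
        omega
      rw [dif_pos hk'lt]
      apply ih _ hk'lt
      · rw [hk']
        apply border_up (t.take i) _ k hkb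
        rw [← htk]
        exact max_isBorder _ hne
      · intro m hm hmc
        have hmk : m ≤ k := hmax m hm hmc
        have hmne : m ≠ k := by
          rintro rfl
          exact hcne hmc.symm
        have hdn := border_down (t.take i) m k hm hkb (by omega)
        rw [← htk] at hdn
        rw [hk']
        exact border_le_max _ _ hdn
    · rw [dif_neg hcond]
      refine ⟨hkb, hmax, ?_⟩
      rcases Nat.eq_zero_or_pos k with h0 | hpos
      · exact Or.inl h0
      · refine Or.inr ?_
        by_contra hne2
        exact hcond ⟨hpos, fun hce => hne2 hce.symm⟩

-- one iteration of the for loop computes the longest border of (t.take i) ++ [c]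
lemma kmpStep_spec (t : List Char) (pi : Array Nat) (i : Nat) (hi : i ≤ t.length) (hi1 : 1 ≤ i)
    (hpi : ∀ j, j < i → pi.getD j 0 = maxBorder (t.take (j + 1))) (c : Char) :
    kmpStep pi t c (pi.getD (i - 1) 0) = maxBorder (t.take i ++ [c]) := by
  have hulen : (t.take i).length = i := by simp [List.length_take]; omega
  have hune : t.take i ≠ [] := by
    intro hnil
    have := congrArg List.length hnil
    rw [hulen] at this
    simp at this
    omega
  have hk0 : pi.getD (i - 1) 0 = maxBorder (t.take i) := by
    rw [hpi (i - 1) (by omega)]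
    congr 2
    omega
  obtain ⟨hb, hmax, hlast⟩ := kmpFall_spec t pi i hi hpi c (pi.getD (i - 1) 0)
    (by rw [hk0]; exact max_isBorder _ hune)
    (by intro m hm _; rw [hk0]; exact border_le_max _ _ hm)
  unfold kmpStep
  generalize hgen : kmpFall pi t c (pi.getD (i - 1) 0) = r at hb hmax hlast ⊢
  have hrlt : r < i := by
    have := ((isBorder_iff _ _).mp hb).1
    omega
  have hbu : isBorder (t.take i) r = true := hb
  by_cases hc : c = t.getD r sepB
  · rw [if_pos hc]
    apply le_antisymm
    · apply border_le_max
      rw [border_ext]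
      exact ⟨hbu, by rw [getD_take t i r hrlt]; exact hc.symm⟩
    · have hne2 : t.take i ++ [c] ≠ [] := by simp
      have hbm := max_isBorder _ hne2
      rcases Nat.eq_zero_or_pos (maxBorder (t.take i ++ [c])) with h0 | hp
      · omega
      · obtain ⟨m, hm⟩ : ∃ m, maxBorder (t.take i ++ [c]) = m + 1 :=
          ⟨maxBorder (t.take i ++ [c]) - 1, by omega⟩
        rw [hm] at hbm
        obtain ⟨hmb, hmc⟩ := (border_ext _ _ _).mp hbm
        have hmlt : m < i := by
          have := ((isBorder_iff _ _).mp hmb).1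
          omega
        have := hmax m hmb (by rw [← getD_take t i m hmlt]; exact hmc)
        omega
  · rw [if_neg hc]
    have hr0 : r = 0 := by
      rcases hlast with h | h
      · exact h
      · exact absurd h.symm hc
    rw [hr0]
    by_contra hne0
    have hne2 : t.take i ++ [c] ≠ [] := by simp
    have hp : 0 < maxBorder (t.take i ++ [c]) := Nat.pos_of_ne_zero (fun h => hne0 h.symm)
    obtain ⟨m, hm⟩ : ∃ m, maxBorder (t.take i ++ [c]) = m + 1 :=
      ⟨maxBorder (t.take i ++ [c]) - 1, by omega⟩
    have hbm := max_isBorder _ hne2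
    rw [hm] at hbm
    obtain ⟨hmb, hmc⟩ := (border_ext _ _ _).mp hbm
    have hmlt : m < i := by
      have := ((isBorder_iff _ _).mp hmb).1
      omega
    have hm0 : m = 0 := by
      have := hmax m hmb (by rw [← getD_take t i m hmlt]; exact hmc)
      omega
    rw [hm0] at hmc
    rw [hr0] at hc
    exact hc (by rw [← getD_take t i 0 (by omega)]; exact hmc.symm)

-- the for loop fills the whole prefix-function table correctly
lemma kmpLoop_spec (t : List Char) :
    ∀ N i pi, t.length - i ≤ N → 1 ≤ i → pi.size = i →
      (∀ j, j < i → pi.getD j 0 = maxBorder (t.take (j + 1))) →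
      ∀ j, j < t.length → (kmpLoop t pi i).getD j 0 = maxBorder (t.take (j + 1)) := by
  intro N
  induction N with
  | zero =>
    intro i pi hN _ _ hpi j hj
    rw [kmpLoop, dif_neg (by omega)]
    exact hpi j (by omega)
  | succ N ihN =>
    intro i pi hN hi1 hsize hpi j hj
    by_cases hi : i < t.length
    · rw [kmpLoop, dif_pos hi]
      have hstep := kmpStep_spec t pi i (le_of_lt hi) hi1 hpi (t.getD i sepB)
      have htake : t.take i ++ [t.getD i sepB] = t.take (i + 1) := by
        rw [List.take_add_one, List.getElem?_eq_getElem hi]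
        rw [List.getD_eq_getElem t sepB hi]
        rfl
      apply ihN (i + 1) _ (by omega) (by omega) (by simp [hsize])
      · intro j' hj'
        rcases Nat.lt_or_ge j' i with hlt | hge
        · rw [getD_push_lt _ _ _ (by omega)]
          exact hpi j' hlt
        · have hj'i : j' = i := by omega
          subst hj'i
          rw [← hsize, getD_push_size, hsize, hstep, htake]
      · exact hj
    · rw [kmpLoop, dif_neg hi]
      exact hpi j (by omega)

-- Source B's lpp(s) equals the longest proper border of s + '\x00' + reversed(s)
lemma lppB_eq (s : List Char) : lppB s = maxBorder (s ++ sepB :: s.reverse) := by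
  set t := s ++ sepB :: s.reverse with htdef
  have hlen : t.length = 2 * s.length + 1 := by
    rw [htdef]
    simp
    omega
  have hm1 : maxBorder (t.take 1) = 0 := by
    have h1 : (t.take 1).length = 1 := by simp [List.length_take]; omega
    rw [maxBorder, h1]
    exact Nat.findGreatest_zero
  have hall := kmpLoop_spec t t.length 1 #[0] (by omega) le_rfl (by simp)
    (by
      intro j hj
      have hj0 : j = 0 := by omega
      subst hj0
      simpa using hm1.symm)
    (t.length - 1) (by omega)
  rw [lppB, ← htdef]
  rw [hall]
  have h2 : t.length - 1 + 1 = t.length := by omega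
  rw [h2, List.take_length]

-- generic: findGreatest ignores a range where the predicate is false
lemma fg_false_above (P : Nat → Prop) [DecidablePred P] :
    ∀ (m n : Nat), n ≤ m → (∀ k, n < k → k ≤ m → ¬ P k) →
      Nat.findGreatest P m = Nat.findGreatest P n := by
  intro m
  induction m with
  | zero =>
    intro n h _
    have hn : n = 0 := by omega
    rw [hn]
  | succ m ih =>
    intro n hnm hf
    rcases Nat.eq_or_lt_of_le hnm with heq | hlt
    · rw [heq]
    · rw [Nat.findGreatest_succ, if_neg (hf (m + 1) (by omega) le_rfl)]
      exact ih n (by omega) (fun k h1 h2 => hf k h1 (by omega))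

-- generic: findGreatest respects pointwise equivalence of the predicates
lemma fg_congr (P Q : Nat → Prop) [DecidablePred P] [DecidablePred Q] (n : Nat)
    (h : ∀ k ≤ n, (P k ↔ Q k)) : Nat.findGreatest P n = Nat.findGreatest Q n := by
  induction n with
  | zero => simp
  | succ m ih =>
    rw [Nat.findGreatest_succ, Nat.findGreatest_succ]
    by_cases hp : P (m + 1)
    · rw [if_pos hp, if_pos ((h (m + 1) le_rfl).mp hp)]
    · rw [if_neg hp, if_neg (fun hq => hp ((h (m + 1) le_rfl).mpr hq)),
        ih (fun k hk => h k (by omega))]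

-- with the unique separator, borders of s + '\x00' + reversed(s) are exactly
-- the palindromic prefixes of s
lemma maxBorder_sep (s : List Char) (hs : sepB ∉ s) :
    maxBorder (s ++ sepB :: s.reverse) = GPal s s.length := by
  have hlen : (s ++ sepB :: s.reverse).length = 2 * s.length + 1 := by simp; omega
  have hiff : ∀ k, k ≤ s.length →
      (isBorder (s ++ sepB :: s.reverse) k = true ↔ s.take k = (s.take k).reverse) := by
    intro k hk
    rw [isBorder_iff]
    have h1 : (s ++ sepB :: s.reverse).take k = s.take k := List.take_append_of_le_length hk
    have h2 : (s ++ sepB :: s.reverse).drop ((s ++ sepB :: s.reverse).length - k)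
        = (s.take k).reverse := by
      rw [hlen]
      have hidx : 2 * s.length + 1 - k = s.length + (s.length + 1 - k) := by omega
      rw [hidx, List.drop_length_add_append]
      have hidx2 : s.length + 1 - k = (s.length - k) + 1 := by omega
      rw [hidx2, List.drop_succ_cons, List.reverse_take]
    rw [h1, h2, hlen]
    constructor
    · rintro ⟨-, h⟩
      exact h
    · intro h
      exact ⟨by omega, h⟩
  have hfalse : ∀ k, s.length < k → k ≤ 2 * s.length →
      ¬ isBorder (s ++ sepB :: s.reverse) k = true := by
    intro k h1 h2 hb
    obtain ⟨hklt, heq⟩ := (isBorder_iff _ _).mp hb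
    have e1 : ((s ++ sepB :: s.reverse).take k)[s.length]? = some sepB := by
      rw [List.getElem?_take, if_pos h1, List.getElem?_append_right (le_refl _)]
      simp
    have e2 : ((s ++ sepB :: s.reverse).drop ((s ++ sepB :: s.reverse).length - k))[s.length]?
        = (s ++ sepB :: s.reverse)[2 * s.length + 1 - k + s.length]? := by
      rw [List.getElem?_drop, hlen]
    have e3 : (s ++ sepB :: s.reverse)[2 * s.length + 1 - k + s.length]?
        = s.reverse[2 * s.length - k]? := by
      rw [List.getElem?_append_right (by omega)]
      have h3 : 2 * s.length + 1 - k + s.length - s.length = (2 * s.length - k) + 1 := by omega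
      rw [h3, List.getElem?_cons_succ]
    have hrevlt : 2 * s.length - k < s.reverse.length := by simp; omega
    have e4 : s.reverse[2 * s.length - k]? = some (s.reverse[2 * s.length - k]) :=
      List.getElem?_eq_getElem hrevlt
    have hmem : s.reverse[2 * s.length - k] ∈ s := by
      have hm := List.getElem_mem hrevlt
      rwa [List.mem_reverse] at hm
    have hcontra : some sepB = some (s.reverse[2 * s.length - k]) := by
      rw [← e1, heq, e2, e3, e4]
    exact hs (by rw [Option.some_inj.mp hcontra]; exact hmem)
  have hb1 : (s ++ sepB :: s.reverse).length - 1 = 2 * s.length := by omega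
  rw [maxBorder, hb1, GPal, fg_false_above _ (2 * s.length) s.length (by omega) hfalse]
  exact fg_congr _ _ s.length hiff

-- ===== A-side lemmas (characterising A's loops by greatest palindromic prefix/suffix) =====

lemma seg_cons_concat (cs : List Char) (left right : Nat) (hlr : left < right)
    (hr : right < cs.length) :
    (cs.drop left).take (right + 1 - left)
      = cs[left]'(by omega) :: ((cs.drop (left + 1)).take (right - 1 + 1 - (left + 1)) ++ [cs[right]'hr]) := by
  obtain ⟨j, hj⟩ : ∃ j, right - left = j + 1 := ⟨right - left - 1, by omega⟩
  rw [← List.getElem_cons_drop (as := cs) (i := left) (h := by omega)]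
  have h1 : right + 1 - left = j + 1 + 1 := by omega
  have h2 : right - 1 + 1 - (left + 1) = j := by omega
  rw [h1, h2, List.take_succ_cons, List.take_add_one]
  have h3 : (cs.drop (left + 1))[j]? = some (cs[right]'hr) := by
    rw [List.getElem?_drop]
    have h4 : left + 1 + j = right := by omega
    rw [h4, List.getElem?_eq_getElem hr]
  rw [h3]
  simp

lemma isP_base (cs : List Char) (left right : Nat) (hle : right ≤ left)
    (_hr : right < cs.length) :
    isP cs left right
      = decide ((cs.drop left).take (right + 1 - left)
          = ((cs.drop left).take (right + 1 - left)).reverse) := by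
  rw [isP, dif_neg (by omega)]
  rcases Nat.lt_or_ge right left with h | h
  · have h0 : right + 1 - left = 0 := by omega
    simp [h0]
  · have hl : left = right := by omega
    have h1 : right + 1 - left = 1 := by omega
    have hone : ∀ (l : List Char), l.take 1 = (l.take 1).reverse := by
      intro l; cases l <;> simp
    rw [h1, hl, ← hone]
    simp

lemma isP_eq (cs : List Char) (d left right : Nat) (hd : right - left ≤ d)
    (hr : right < cs.length) :
    isP cs left right
      = decide ((cs.drop left).take (right + 1 - left)
          = ((cs.drop left).take (right + 1 - left)).reverse) := by
  induction d generalizing left right with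
  | zero => exact isP_base cs left right (by omega) hr
  | succ d ih =>
      rcases Nat.lt_or_ge left right with hlr | hle
      · rw [isP, dif_pos (by omega)]
        have hl : left < cs.length := by omega
        have hget : PySem.List.pyGet? cs (left : Int) = PySem.List.pyGet? cs (right : Int)
            ↔ cs[left]'hl = cs[right]'hr := by
          rw [PySem.List.pyGet?_natCast, PySem.List.pyGet?_natCast,
            List.getElem?_eq_getElem hl, List.getElem?_eq_getElem hr]
          simp
        rw [seg_cons_concat cs left right hlr hr]
        have hcast1 : (left : Int) + 1 = ((left + 1 : Nat) : Int) := by push_cast; ring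
        have hcast2 : (right : Int) - 1 = ((right - 1 : Nat) : Int) := by
          have : 1 ≤ right := by omega
          push_cast [this]; ring
        rw [hcast1, hcast2, ih (left + 1) (right - 1) (by omega) (by omega)]
        have hrev : ∀ (a b : Char) (inner : List Char),
            (a :: (inner ++ [b])).reverse = b :: (inner.reverse ++ [a]) := by
          intro a b inner; simp
        by_cases hab : cs[left]'hl = cs[right]'hr
        · rw [if_neg (by simp only [ne_eq, hget]; exact fun h => h hab)]
          rw [decide_eq_decide, hab, hrev]
          constructor
          · intro h; rw [← h]
          · intro h
            exact (List.append_left_inj _).mp (List.cons_eq_cons.mp h).2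
        · rw [if_pos (by simp only [ne_eq, hget]; exact hab)]
          symm
          rw [decide_eq_false_iff_not]
          intro h
          rw [hrev] at h
          exact hab (List.cons_eq_cons.mp h).1
      · exact isP_base cs left right hle hr

lemma take_one_pal (l : List Char) : l.take 1 = (l.take 1).reverse := by
  cases l <;> simp

-- A's first while loop counts n minus the longest palindromic prefix
lemma loopR_eq (cs : List Char) (k : Nat) (hk : k ≤ cs.length) (add : Int) :
    loopR cs 0 ((k : Int) - 1) add = add + ((k : Int) - GPal cs k) := by
  induction k generalizing add with
  | zero =>
    rw [loopR, dif_neg (by omega)]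
    simp [GPal]
  | succ k ih =>
    match k with
    | 0 =>
      rw [loopR, dif_neg (by norm_num)]
      have h1 : GPal cs 1 = 1 := by
        rw [GPal, Nat.findGreatest_succ, if_pos (take_one_pal cs)]
      rw [h1]
      push_cast
      ring
    | j + 1 =>
      rw [loopR, dif_pos (by push_cast; omega)]
      have hcast : ((j + 2 : Nat) : Int) - 1 = ((j + 1 : Nat) : Int) := by push_cast; ring
      have hiso : isP cs 0 ((j + 1 : Nat) : Int)
          = decide (cs.take (j + 2) = (cs.take (j + 2)).reverse) := by
        have := isP_eq cs (j + 1) 0 (j + 1) (by omega) (by omega)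
        simpa using this
      rw [hcast, hiso]
      by_cases hpal : cs.take (j + 2) = (cs.take (j + 2)).reverse
      · rw [if_pos (by simpa using hpal)]
        rw [show GPal cs (j + 2) = j + 2 from by
          rw [GPal, Nat.findGreatest_succ, if_pos hpal]]
        push_cast
        ring
      · rw [if_neg (by simpa using hpal)]
        rw [ih (by omega) (add + 1)]
        rw [show GPal cs (j + 2) = GPal cs (j + 1) from by
          rw [GPal, Nat.findGreatest_succ, if_neg hpal]; rfl]
        push_cast
        ring

-- A's second while loop counts n minus the longest palindromic suffix
lemma loopL_eq (cs : List Char) (m : Nat) (hm : m ≤ cs.length) (add : Int) :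
    loopL cs ((cs.length : Int) - (m : Int)) ((cs.length : Int) - 1) add
      = add + ((m : Int) - HPal cs m) := by
  induction m generalizing add with
  | zero =>
    rw [loopL, dif_neg (by omega)]
    simp [HPal]
  | succ m ih =>
    match m with
    | 0 =>
      rw [loopL, dif_neg (by omega)]
      have h2 := take_one_pal (cs.drop (cs.length - 1))
      rw [List.take_of_length_le (by simp; omega)] at h2
      have h1 : HPal cs 1 = 1 := by
        rw [HPal, Nat.findGreatest_succ, if_pos h2]
      rw [h1]
      push_cast
      ring
    | j + 1 =>
      rw [loopL, dif_pos (by omega)]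
      have hlen : j + 1 + 1 ≤ cs.length := by omega
      have hiso : isP cs ((cs.length : Int) - ((j + 1 + 1 : Nat) : Int)) ((cs.length : Int) - 1)
          = decide (cs.drop (cs.length - (j + 1 + 1)) = (cs.drop (cs.length - (j + 1 + 1))).reverse) := by
        have hc1 : (cs.length : Int) - ((j + 1 + 1 : Nat) : Int) = ((cs.length - (j + 1 + 1) : Nat) : Int) := by
          push_cast [hlen]; ring
        have hc2 : (cs.length : Int) - 1 = ((cs.length - 1 : Nat) : Int) := by
          push_cast [show 1 ≤ cs.length by omega]; ring
        rw [hc1, hc2, isP_eq cs cs.length (cs.length - (j + 1 + 1)) (cs.length - 1) (by omega) (by omega)]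
        have hseg : (cs.drop (cs.length - (j + 1 + 1))).take (cs.length - 1 + 1 - (cs.length - (j + 1 + 1)))
            = cs.drop (cs.length - (j + 1 + 1)) := by
          apply List.take_of_length_le
          simp
          omega
        rw [hseg]
      rw [hiso]
      by_cases hpal : cs.drop (cs.length - (j + 1 + 1)) = (cs.drop (cs.length - (j + 1 + 1))).reverse
      · rw [if_pos (by simpa using hpal)]
        rw [show HPal cs (j + 1 + 1) = j + 1 + 1 from by
          rw [HPal, Nat.findGreatest_succ, if_pos hpal]]
        push_cast
        ring
      · rw [if_neg (by simpa using hpal)]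
        have hc3 : (cs.length : Int) - ((j + 1 + 1 : Nat) : Int) + 1 = (cs.length : Int) - ((j + 1 : Nat) : Int) := by
          push_cast; ring
        rw [hc3, ih (by omega) (add + 1)]
        rw [show HPal cs (j + 1 + 1) = HPal cs (j + 1) from by
          rw [HPal, Nat.findGreatest_succ, if_neg hpal]; rfl]
        push_cast
        ring

-- palindromic suffixes of cs are palindromic prefixes of cs.reverse
lemma hpal_eq_gpal_rev (cs : List Char) : HPal cs cs.length = GPal cs.reverse cs.length := by
  rw [HPal, GPal]
  apply fg_congr
  intro k _
  have h2 : cs.reverse.take k = (cs.drop (cs.length - k)).reverse := by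
    have h3 := List.reverse_take (l := cs.reverse) (i := k)
    rw [List.reverse_reverse, List.length_reverse] at h3
    rw [← h3, List.reverse_reverse]
  rw [h2]
  simp [eq_comm]

-- ===== VERDICT (by name: the statement is the Claim_ definition above) =====
theorem checkMinPLength_spec : Claim_equal_checkMinPLength := by
  intro s hdom
  have hsep : sepB ∉ s.toList := by
    intro hmem
    have hall := List.all_eq_true.mp hdom sepB hmem
    simp [pvDomChar, sepB] at hall
  unfold Spec_checkMinPLength checkMinPLength checkMinPLength_alt
  simp only []
  set cs := s.toList with hcs
  have hR := loopR_eq cs cs.length le_rfl 0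
  have hL := loopL_eq cs cs.length le_rfl 0
  simp only [sub_self] at hL
  have hB1 : lppB cs = GPal cs cs.length := by
    rw [lppB_eq, maxBorder_sep cs hsep]
  have hB2 : lppB cs.reverse = GPal cs.reverse cs.reverse.length := by
    rw [lppB_eq, maxBorder_sep _ (by simpa using hsep)]
  have hHG : HPal cs cs.length = GPal cs.reverse cs.length := hpal_eq_gpal_rev cs
  have hlenrev : cs.reverse.length = cs.length := by simp
  have hGle : GPal cs cs.length ≤ cs.length := Nat.findGreatest_le _
  have hHle : HPal cs cs.length ≤ cs.length := Nat.findGreatest_le _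
  rw [hR, hL, hB1, hB2, hlenrev, ← hHG]
  push_cast
  omega
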